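-- pv_equiv track=rewrite | github.com/sleepy-spy/no-limit-texas-holdem | poker.py | card_frequency_check
-- ===== SOURCE A (Python) =====
-- def card_frequency_check(card_ranks, frequency_wanted):
--     frequencies = {}
--     for card_rank in card_ranks:
--         frequencies[card_rank] = frequencies.get(card_rank, 0) + 1
--     else:
--         if frequency_wanted in frequencies.values():
--             return True
--         else:
--             return False
-- ===== SOURCE B (Python) =====
-- def card_frequency_check(card_ranks, frequency_wanted):
--     # Sort a copy, then scan once: close each run of equal values at its
--     # right boundary and compare the run length to frequency_wanted.
--     s = sorted(card_ranks)
--     run = 0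
--     for i, x in enumerate(s):
--         run += 1
--         if i + 1 == len(s) or s[i + 1] != x:
--             if run == frequency_wanted:
--                 return True
--             run = 0
--     return False
-- ===== Notes on version B (the rewrite author's own statement) =====
-- stated objective: alternative
-- what changed: Replaces the frequency-dictionary build plus values-membership test with a sort of a copy followed by a single run-length scan that returns True as soon as a run of equal values has exactly the wanted length.
import Mathlib
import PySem

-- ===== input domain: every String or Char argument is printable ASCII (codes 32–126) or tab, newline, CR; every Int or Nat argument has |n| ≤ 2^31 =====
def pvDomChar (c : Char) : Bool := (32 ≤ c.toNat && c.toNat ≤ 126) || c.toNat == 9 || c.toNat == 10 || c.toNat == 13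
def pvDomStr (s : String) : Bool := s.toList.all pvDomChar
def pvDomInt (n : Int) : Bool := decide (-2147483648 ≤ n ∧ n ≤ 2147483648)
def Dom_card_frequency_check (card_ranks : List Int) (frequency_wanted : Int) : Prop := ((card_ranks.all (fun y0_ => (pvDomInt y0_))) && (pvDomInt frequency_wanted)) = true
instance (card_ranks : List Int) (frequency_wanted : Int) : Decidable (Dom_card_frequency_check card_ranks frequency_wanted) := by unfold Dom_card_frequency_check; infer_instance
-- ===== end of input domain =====

-- B replaces A's frequency-dictionary build + values-membership test by sorting a
-- copy and scanning it once for a run of equal values of length frequency_wanted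
-- (alternative decomposition; return value only, neither mutates its arguments).

-- ===== PORT A =====
def card_frequency_check (card_ranks : List Int) (frequency_wanted : Int) : Bool :=
  -- frequencies = {}; for card_rank in card_ranks: frequencies[card_rank] = frequencies.get(card_rank, 0) + 1
  let frequencies : PySem.Dict Int Int :=
    card_ranks.foldl (fun d card_rank => d.insert card_rank (d.getD card_rank 0 + 1)) PySem.Dict.empty
  -- if frequency_wanted in frequencies.values(): return True else: return False
  if frequencies.values.contains frequency_wanted then true else false

-- ===== PORT B =====
-- the 'for i, x in enumerate(s)' loop of Source B: run-length accumulator, a run is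
-- closed when the next element differs (or the list ends)
def pvRunLoop (frequency_wanted : Int) : List Int → Int → Bool
  | [], _ => false
  | x :: rest, run =>
    let run := run + 1
    match rest with
    | [] => if run == frequency_wanted then true else false
    | y :: rest' =>
      if y != x then
        if run == frequency_wanted then true else pvRunLoop frequency_wanted (y :: rest') 0
      else pvRunLoop frequency_wanted (y :: rest') run

def card_frequency_check_alt (card_ranks : List Int) (frequency_wanted : Int) : Bool :=
  pvRunLoop frequency_wanted (PySem.List.sorted card_ranks (fun x => x) false) 0

-- ===== PRECONDITION & SPEC =====
def Spec_card_frequency_check (card_ranks : List Int) (frequency_wanted : Int) (out : Bool) : Prop := out = card_frequency_check_alt card_ranks frequency_wanted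
instance (card_ranks : List Int) (frequency_wanted : Int) (out : Bool) : Decidable (Spec_card_frequency_check card_ranks frequency_wanted out) := by unfold Spec_card_frequency_check; infer_instance

-- ===== CLAIM (what is proved, stated in full; the proofs are below) =====
def Claim_equal_card_frequency_check : Prop := ∀ (card_ranks : List Int) (frequency_wanted : Int), Dom_card_frequency_check card_ranks frequency_wanted → Spec_card_frequency_check card_ranks frequency_wanted (card_frequency_check card_ranks frequency_wanted)

-- ===== LEMMAS AND PROOFS =====

-- A = "some value occurs exactly frequency_wanted times"
lemma pvA_iff (xs : List Int) (f : Int) :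
    card_frequency_check xs f = true ↔ ∃ y ∈ xs, (xs.count y : Int) = f := by
  unfold card_frequency_check
  rw [PySem.Dict.foldl_insert_getD_add_one_eq_counter]
  simp only [PySem.Dict.values, PySem.Dict.items_counter, List.map_map]
  simp [PySem.Set.mem_ofList, eq_comm]

-- in a sorted cons list whose head differs from the next element, the head does
-- not reappear
lemma pv_head_not_mem {x y : Int} {rest : List Int}
    (hs : (x :: y :: rest).Pairwise (· ≤ ·)) (hxy : x ≠ y) : x ∉ y :: rest := by
  intro hx
  have h1 : x ≤ y := (List.pairwise_cons.1 hs).1 y (by simp)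
  rcases List.mem_cons.1 hx with h | h
  · exact hxy h
  · have h2 : y ≤ x := (List.pairwise_cons.1 (List.pairwise_cons.1 hs).2).1 x h
    exact hxy (le_antisymm h1 h2)

-- characterisation of the run scan on a sorted cons list
lemma pvRunLoop_iff (f : Int) (x : Int) (rest : List Int) (run : Int)
    (hs : (x :: rest).Pairwise (· ≤ ·)) :
    pvRunLoop f (x :: rest) run = true ↔
      (run + ((x :: rest).count x : Int) = f ∨
        ∃ y ∈ rest, y ≠ x ∧ (((x :: rest).count y : Int) = f)) := by
  induction rest generalizing x run with
  | nil =>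
    simp only [pvRunLoop, List.count_cons_self, List.count_nil]
    constructor
    · intro h
      left
      have : run + 1 = f := by
        by_contra hf
        simp [show (run + 1 == f) = false by simp [hf]] at h
      push_cast
      omega
    · rintro (h | ⟨y, hy, _⟩)
      · push_cast at h
        simp [show run + 1 = f by omega]
      · exact absurd hy (List.not_mem_nil)
  | cons y rest' ih =>
    by_cases hxy : x = y
    · subst hxy
      have ihy := ih x (run + 1) (List.pairwise_cons.1 hs).2
      have hL : pvRunLoop f (x :: x :: rest') run = pvRunLoop f (x :: rest') (run + 1) := by
        simp [pvRunLoop]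
      rw [hL, ihy]
      constructor
      · rintro (h | ⟨z, hz, hzx, hc⟩)
        · left
          rw [List.count_cons_self]
          push_cast at h ⊢
          omega
        · exact Or.inr ⟨z, List.mem_cons_of_mem x hz, hzx,
            by rwa [List.count_cons_of_ne (Ne.symm hzx)]⟩
      · rintro (h | ⟨z, hz, hzx, hc⟩)
        · left
          rw [List.count_cons_self] at h
          push_cast at h ⊢
          omega
        · rcases List.mem_cons.1 hz with rfl | hz'
          · exact absurd rfl hzx
          · exact Or.inr ⟨z, hz', hzx, by rwa [List.count_cons_of_ne (Ne.symm hzx)] at hc⟩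
    · have hnm : x ∉ y :: rest' := pv_head_not_mem hs hxy
      have htail := ih y 0 (List.pairwise_cons.1 hs).2
      have hyx : (y != x) = true := by simp [bne_iff_ne]; exact fun h => hxy h.symm
      have hL : pvRunLoop f (x :: y :: rest') run
          = if (run + 1 == f) = true then true else pvRunLoop f (y :: rest') 0 := by
        simp [pvRunLoop, hyx]
      have hcx : ((x :: y :: rest').count x : Int) = 1 := by
        rw [List.count_cons_self, List.count_eq_zero.2 hnm]
        norm_num
      rw [hL]
      constructor
      · intro h
        by_cases hf : run + 1 = f
        · left
          rw [hcx]
          omega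
        · rw [if_neg (by simp [hf]), htail] at h
          rcases h with h' | ⟨z, hz, hzy, hc⟩
          · refine Or.inr ⟨y, List.mem_cons_self, fun h => hxy h.symm, ?_⟩
            rw [List.count_cons_of_ne hxy]
            omega
          · have hzx : z ≠ x := fun h => hnm (h ▸ List.mem_cons_of_mem y hz)
            refine Or.inr ⟨z, List.mem_cons_of_mem y hz, hzx, ?_⟩
            rwa [List.count_cons_of_ne (Ne.symm hzx)]
      · rintro (h | ⟨z, hz, hzx, hc⟩)
        · rw [hcx] at h
          rw [if_pos (by simp; omega)]
        · by_cases hf : run + 1 = f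
          · rw [if_pos (by simp [hf])]
          · rw [if_neg (by simp [hf]), htail]
            rw [List.count_cons_of_ne (Ne.symm hzx)] at hc
            rcases List.mem_cons.1 hz with rfl | hz'
            · left
              omega
            · by_cases hzy : z = y
              · subst hzy
                left
                omega
              · exact Or.inr ⟨z, hz', hzy, hc⟩

-- B = the same existence statement
lemma pvB_iff (xs : List Int) (f : Int) :
    card_frequency_check_alt xs f = true ↔ ∃ y ∈ xs, (xs.count y : Int) = f := by
  unfold card_frequency_check_alt
  have hperm := PySem.List.sorted_perm xs (fun x => x) false
  have hpw : (PySem.List.sorted xs (fun x => x) false).Pairwise (· ≤ ·) := by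
    simpa using PySem.List.sorted_pairwise xs (fun x => x)
  cases hsort : PySem.List.sorted xs (fun x => x) false with
  | nil =>
    have : xs = [] := by
      have := hsort ▸ hperm
      exact this.symm.eq_nil
    simp [this, pvRunLoop]
  | cons x rest =>
    rw [hsort] at hperm hpw
    rw [pvRunLoop_iff f x rest 0 hpw]
    constructor
    · rintro (h | ⟨y, hy, _, hc⟩)
      · exact ⟨x, hperm.mem_iff.1 (by simp), by rw [← hperm.count_eq]; simpa using h⟩
      · exact ⟨y, hperm.mem_iff.1 (by simp [hy]), by rw [← hperm.count_eq]; exact hc⟩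
    · rintro ⟨y, hy, hc⟩
      by_cases hyx : y = x
      · left
        subst hyx
        rw [← hperm.count_eq] at hc
        omega
      · right
        refine ⟨y, ?_, hyx, by rw [hperm.count_eq]; exact hc⟩
        rcases List.mem_cons.1 (hperm.mem_iff.2 hy) with h | h
        · exact absurd h hyx
        · exact h

-- ===== VERDICT (by name: the statement is the Claim_ definition above) =====
theorem card_frequency_check_spec : Claim_equal_card_frequency_check := by
  intro xs f _
  unfold Spec_card_frequency_check
  have ha := pvA_iff xs f
  have hb := pvB_iff xs f
  cases h : card_frequency_check xs f with
  | true => exact (hb.2 (ha.1 h)).symm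
  | false =>
    cases h' : card_frequency_check_alt xs f with
    | true => exact absurd (ha.2 (hb.1 h')) (by simp [h])
    | false => rfl
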